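-- pv_equiv track=rewrite | github.com/saracreatecode/Python-Programming | outlook-contactos-sincronizacion/02_sincronizar_outlook.py | construir_notes
-- ===== SOURCE A (Python) =====
-- def construir_notes(fila):
--     """
--     Construye el contenido del campo Notes de Outlook
--     con los campos que no tienen equivalente nativo.
--     """
--     lineas = []
--
--     # Información de clasificación
--     campos_info = [
--         ("Área",         fila.get("area", "")),
--         ("Tipo empresa", fila.get("tipo", "")),
--         ("Año últ. trabajo", fila.get("año_ultimo_trabajo", "")),
--     ]
--     for etiqueta, valor in campos_info:
--         if valor and str(valor).strip():
--             lineas.append(f"{etiqueta}: {valor}")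
--
--     # Separador antes de acciones si hay info arriba
--     acciones = []
--     for i in range(1, 7):
--         val = fila.get(f"accion{i}", "")
--         if val and str(val).strip():
--             acciones.append(f"Acción {i}: {val}")
--
--     if acciones:
--         if lineas:
--             lineas.append("─" * 30)
--         lineas.extend(acciones)
--
--     # Nota general al final
--     nota = fila.get("nota", "")
--     if nota and str(nota).strip():
--         if lineas:
--             lineas.append("─" * 30)
--         lineas.append(f"Nota: {nota}")
--
--     return "\n".join(lineas)
-- ===== SOURCE B (Python) =====
-- def construir_notes(fila):
--     """Single pass over a declarative field table, emitting directly into the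
--     output string and inserting the separator whenever the field group changes."""
--     SEP = "\u2500" * 30
--     specs = [("area", "Área", 0), ("tipo", "Tipo empresa", 0),
--              ("año_ultimo_trabajo", "Año últ. trabajo", 0)]
--     specs += [(f"accion{i}", f"Acción {i}", 1) for i in range(1, 7)]
--     specs.append(("nota", "Nota", 2))
--     out = ""
--     last = None
--     for key, label, group in specs:
--         val = fila.get(key, "")
--         if val and str(val).strip():
--             line = f"{label}: {val}"
--             if last is None:
--                 out = line
--             elif last == group:
--                 out += "\n" + line
--             else:
--                 out += "\n" + SEP + "\n" + line
--             last = group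
--     return out
-- ===== Notes on version B (the rewrite author's own statement) =====
-- stated objective: alternative
-- what changed: B replaces A's three staged loops with inline 'if lineas:' separator guards by one table-driven pass over a declarative (key,label,group) spec list, appending each kept line directly to the output string and inserting the separator exactly when the group id changes.
import Mathlib
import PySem

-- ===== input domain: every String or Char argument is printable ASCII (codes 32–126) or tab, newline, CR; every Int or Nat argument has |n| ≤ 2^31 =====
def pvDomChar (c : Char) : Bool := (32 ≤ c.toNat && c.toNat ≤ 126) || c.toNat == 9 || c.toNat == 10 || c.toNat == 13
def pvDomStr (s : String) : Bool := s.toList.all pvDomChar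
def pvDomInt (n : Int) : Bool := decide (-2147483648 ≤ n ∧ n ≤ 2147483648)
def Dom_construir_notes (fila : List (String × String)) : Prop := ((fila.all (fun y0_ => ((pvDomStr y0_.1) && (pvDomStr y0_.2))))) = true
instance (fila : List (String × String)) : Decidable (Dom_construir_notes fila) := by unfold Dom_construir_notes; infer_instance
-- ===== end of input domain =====

-- B replaces A's three staged loops with inline separator guards by one table-driven
-- pass over a (key,label,group) spec list, appending each kept line directly to the
-- output string and inserting the separator when the group id changes (objective:
-- alternative decomposition, same cost).

-- shared helpers: Python's fila.get(k, ""), the guard `v and str(v).strip()`, "─"*30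
def pvGet (fila : List (String × String)) (k : String) : String :=
  (PySem.Dict.mk fila).getD k ""
def pvOk (v : String) : Bool := !(v == "") && !(PySem.Str.strip v == "")
def pvSep : String := "──────────────────────────────"

-- ===== PORT A =====
def construir_notes (fila : List (String × String)) : String :=
  let campos_info : List (String × String) :=
    [("Área", pvGet fila "area"),
     ("Tipo empresa", pvGet fila "tipo"),
     ("Año últ. trabajo", pvGet fila "año_ultimo_trabajo")]
  let lineas : List String :=
    campos_info.foldl (fun acc p =>
      if pvOk p.2 then acc ++ [p.1 ++ ": " ++ p.2] else acc) []
  let acciones : List String :=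
    (PySem.List.pyRange 1 7).foldl (fun acc i =>
      let val := pvGet fila ("accion" ++ PySem.Int.toStr i)
      if pvOk val then acc ++ ["Acción " ++ PySem.Int.toStr i ++ ": " ++ val] else acc) []
  let lineas :=
    if acciones.isEmpty then lineas
    else (if lineas.isEmpty then lineas else lineas ++ [pvSep]) ++ acciones
  let nota := pvGet fila "nota"
  let lineas :=
    if pvOk nota then
      (if lineas.isEmpty then lineas else lineas ++ [pvSep]) ++ ["Nota: " ++ nota]
    else lineas
  PySem.Str.join "\n" lineas

-- ===== PORT B =====
-- the loop body of Source B: one kept line is glued to the output according to the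
-- previous group id, and the group id is recorded
def pvStep (fila : List (String × String)) (st : String × Option Int)
    (spec : String × String × Int) : String × Option Int :=
  let val := pvGet fila spec.1
  if pvOk val then
    let line := spec.2.1 ++ ": " ++ val
    let out :=
      match st.2 with
      | none => line
      | some g => if g == spec.2.2 then st.1 ++ "\n" ++ line
                  else st.1 ++ "\n" ++ pvSep ++ "\n" ++ line
    (out, some spec.2.2)
  else st

def construir_notes_alt (fila : List (String × String)) : String :=
  let specs : List (String × String × Int) :=
    [("area", "Área", 0), ("tipo", "Tipo empresa", 0),
     ("año_ultimo_trabajo", "Año últ. trabajo", 0)]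
    ++ (PySem.List.pyRange 1 7).map (fun i =>
         ("accion" ++ PySem.Int.toStr i, "Acción " ++ PySem.Int.toStr i, (1 : Int)))
    ++ [("nota", "Nota", 2)]
  (specs.foldl (pvStep fila) ("", none)).1

-- ===== PRECONDITION & SPEC =====
def Spec_construir_notes (fila : List (String × String)) (out : String) : Prop := out = construir_notes_alt fila
instance (fila : List (String × String)) (out : String) : Decidable (Spec_construir_notes fila out) := by unfold Spec_construir_notes; infer_instance

-- ===== CLAIM =====
def Claim_equal_construir_notes : Prop := ∀ (fila : List (String × String)), Dom_construir_notes fila → Spec_construir_notes fila (construir_notes fila)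

-- ===== LEMMAS AND PROOFS =====

-- A's way of gluing the three blocks into one list of lines
def pvLinesA (i a n : List String) : List String :=
  let l2 := if a.isEmpty then i else (if i.isEmpty then i else i ++ [pvSep]) ++ a
  if n.isEmpty then l2 else (if l2.isEmpty then l2 else l2 ++ [pvSep]) ++ n

-- the glue pvStep applies to a kept line
def pvGlueS (s : String) (last : Option Int) (g : Int) (t : String) : String :=
  match last with
  | none => t
  | some g' => if g' == g then s ++ "\n" ++ t else s ++ "\n" ++ pvSep ++ "\n" ++ t

-- effect of a whole constant-group segment on B's state
def pvAfter (st : String × Option Int) (g : Int) (L : List String) : String × Option Int :=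
  if L.isEmpty then st else (pvGlueS st.1 st.2 g (PySem.Str.join "\n" L), some g)

-- A's three blocks
def pvI (fila : List (String × String)) : List String :=
  (([("Área", pvGet fila "area"),
     ("Tipo empresa", pvGet fila "tipo"),
     ("Año últ. trabajo", pvGet fila "año_ultimo_trabajo")]).filter (fun p => pvOk p.2)).map
    (fun p => p.1 ++ ": " ++ p.2)
def pvAcc (fila : List (String × String)) : List String :=
  ((PySem.List.pyRange 1 7).filter
      (fun i => pvOk (pvGet fila ("accion" ++ PySem.Int.toStr i)))).map
    (fun i => "Acción " ++ PySem.Int.toStr i ++ ": " ++ pvGet fila ("accion" ++ PySem.Int.toStr i))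
def pvN (fila : List (String × String)) : List String :=
  if pvOk (pvGet fila "nota") then ["Nota: " ++ pvGet fila "nota"] else []

@[simp] theorem sjoin_nil (sep : String) : PySem.Str.join sep [] = "" := by
  rw [← String.toList_inj]
  simp [PySem.Str.toList_join, PySem.Chars.join_nil]

@[simp] theorem sjoin_singleton (sep x : String) : PySem.Str.join sep [x] = x := by
  rw [← String.toList_inj]
  simp [PySem.Str.toList_join, PySem.Chars.join_singleton]

theorem sjoin_cons_cons (sep x y : String) (rest : List String) :
    PySem.Str.join sep (x :: y :: rest) = x ++ sep ++ PySem.Str.join sep (y :: rest) := by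
  rw [← String.toList_inj]
  simp [PySem.Str.toList_join, PySem.Chars.join_cons_cons]

theorem cjoin_append (sep : List Char) (xs ys : List (List Char)) (hx : xs ≠ []) (hy : ys ≠ []) :
    PySem.Chars.join sep (xs ++ ys)
      = PySem.Chars.join sep xs ++ sep ++ PySem.Chars.join sep ys := by
  induction xs with
  | nil => exact absurd rfl hx
  | cons x t ih =>
    cases t with
    | nil =>
      cases ys with
      | nil => exact absurd rfl hy
      | cons y u =>
        simp [PySem.Chars.join_cons_cons, PySem.Chars.join_singleton]
    | cons x' t' =>
      have h := ih (by simp)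
      simp only [List.cons_append, PySem.Chars.join_cons_cons] at h ⊢
      rw [h]
      simp [List.append_assoc]

theorem sjoin_append (sep : String) (xs ys : List String) (hx : xs ≠ []) (hy : ys ≠ []) :
    PySem.Str.join sep (xs ++ ys)
      = PySem.Str.join sep xs ++ sep ++ PySem.Str.join sep ys := by
  rw [← String.toList_inj]
  simp only [PySem.Str.toList_join, String.toList_append, List.map_append]
  exact cjoin_append sep.toList (xs.map String.toList) (ys.map String.toList)
    (by simpa using hx) (by simpa using hy)

theorem pvGlueJoin (xs ys : List String) (hx : xs ≠ []) (hy : ys ≠ []) :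
    PySem.Str.join "\n" (xs ++ [pvSep] ++ ys)
      = PySem.Str.join "\n" xs ++ ("\n" ++ pvSep ++ "\n") ++ PySem.Str.join "\n" ys := by
  cases ys with
  | nil => exact absurd rfl hy
  | cons y t =>
    rw [List.append_assoc, sjoin_append "\n" xs ([pvSep] ++ y :: t) hx (by simp)]
    simp only [List.cons_append, List.nil_append, sjoin_cons_cons]
    simp [String.append_assoc]

theorem pvGlueS_append (s : String) (last : Option Int) (g : Int) (t u : String) :
    pvGlueS s last g (t ++ u) = pvGlueS s last g t ++ u := by
  cases last with
  | none => rfl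
  | some g' =>
    by_cases h : g' == g <;> simp [pvGlueS, h, String.append_assoc]

theorem pvStep_eq (fila : List (String × String)) (s : String) (last : Option Int)
    (k lab : String) (g : Int) :
    pvStep fila (s, last) (k, lab, g)
      = if pvOk (pvGet fila k) then (pvGlueS s last g (lab ++ ": " ++ pvGet fila k), some g)
        else (s, last) := by
  cases last <;> simp [pvStep, pvGlueS]

theorem pvAfter_cons (s : String) (last : Option Int) (g : Int) (x : String) (L : List String) :
    pvAfter (pvGlueS s last g x, some g) g L = pvAfter (s, last) g (x :: L) := by
  cases L with
  | nil => simp [pvAfter]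
  | cons y t =>
    simp only [pvAfter, List.isEmpty_cons, Bool.false_eq_true, if_false]
    rw [sjoin_cons_cons, pvGlueS_append, pvGlueS_append]
    simp [pvGlueS]

theorem run_group (fila : List (String × String)) (g : Int)
    (items : List (String × String)) (st : String × Option Int) :
    (items.map (fun p => (p.1, p.2, g))).foldl (pvStep fila) st
      = pvAfter st g
          ((items.filter (fun p => pvOk (pvGet fila p.1))).map
            (fun p => p.2 ++ ": " ++ pvGet fila p.1)) := by
  induction items generalizing st with
  | nil => simp [pvAfter]
  | cons p t ih =>
    obtain ⟨s, last⟩ := st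
    by_cases h : pvOk (pvGet fila p.1)
    · simp only [List.map_cons, List.foldl_cons, List.filter_cons, h, if_pos]
      rw [pvStep_eq, if_pos h, ih, pvAfter_cons]
    · simp only [List.map_cons, List.foldl_cons, List.filter_cons, h, Bool.false_eq_true, if_false]
      rw [pvStep_eq, if_neg (by simp [h]), ih]

theorem pvAfter3 (i a n : List String) :
    (pvAfter (pvAfter (pvAfter ("", none) 0 i) 1 a) 2 n).1
      = PySem.Str.join "\n" (pvLinesA i a n) := by
  cases i with
  | nil =>
    cases a with
    | nil =>
      cases n with
      | nil => simp [pvAfter, pvLinesA]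
      | cons z nz => simp [pvAfter, pvLinesA, pvGlueS]
    | cons y az =>
      cases n with
      | nil => simp [pvAfter, pvLinesA, pvGlueS]
      | cons z nz =>
        simp only [pvAfter, pvLinesA, List.isEmpty_nil, List.isEmpty_cons,
          Bool.false_eq_true, if_false, if_true, List.nil_append, pvGlueS]
        rw [pvGlueJoin (y :: az) (z :: nz) (by simp) (by simp)]
        simp [String.append_assoc]
  | cons x iz =>
    cases a with
    | nil =>
      cases n with
      | nil => simp [pvAfter, pvLinesA, pvGlueS]
      | cons z nz =>
        simp only [pvAfter, pvLinesA, List.isEmpty_nil, List.isEmpty_cons,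
          Bool.false_eq_true, if_false, if_true, pvGlueS]
        rw [pvGlueJoin (x :: iz) (z :: nz) (by simp) (by simp)]
        simp [String.append_assoc]
    | cons y az =>
      cases n with
      | nil =>
        simp only [pvAfter, pvLinesA, List.isEmpty_nil, List.isEmpty_cons,
          Bool.false_eq_true, if_false, if_true, pvGlueS]
        rw [pvGlueJoin (x :: iz) (y :: az) (by simp) (by simp)]
        simp [String.append_assoc]
      | cons z nz =>
        simp only [pvAfter, pvLinesA, List.isEmpty_cons,
          Bool.false_eq_true, if_false, pvGlueS]
        have h2 : ((x :: iz ++ [pvSep]) ++ y :: az).isEmpty = false := by simp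
        simp only [h2, Bool.false_eq_true, if_false]
        rw [show ((x :: iz ++ [pvSep]) ++ y :: az) ++ [pvSep] ++ z :: nz
              = (x :: iz) ++ [pvSep] ++ ((y :: az) ++ [pvSep] ++ (z :: nz)) by
            simp [List.append_assoc]]
        rw [pvGlueJoin (x :: iz) ((y :: az) ++ [pvSep] ++ (z :: nz)) (by simp) (by simp)]
        rw [pvGlueJoin (y :: az) (z :: nz) (by simp) (by simp)]
        simp [String.append_assoc]

theorem accHelp (fila : List (String × String)) (l : List Int) :
    ((l.map (fun i => ("accion" ++ PySem.Int.toStr i, "Acción " ++ PySem.Int.toStr i))).filter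
        (fun p => pvOk (pvGet fila p.1))).map (fun p => p.2 ++ ": " ++ pvGet fila p.1)
      = (l.filter (fun i => pvOk (pvGet fila ("accion" ++ PySem.Int.toStr i)))).map
          (fun i => "Acción " ++ PySem.Int.toStr i ++ ": "
            ++ pvGet fila ("accion" ++ PySem.Int.toStr i)) := by
  induction l with
  | nil => simp
  | cons i t ih =>
    by_cases h : pvOk (pvGet fila ("accion" ++ PySem.Int.toStr i)) <;>
      simp [h, ih]

theorem hB (fila : List (String × String)) :
    construir_notes_alt fila
      = PySem.Str.join "\n" (pvLinesA (pvI fila) (pvAcc fila) (pvN fila)) := by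
  show (List.foldl (pvStep fila) ("", none)
      ([("area", "Área", (0 : Int)), ("tipo", "Tipo empresa", 0),
        ("año_ultimo_trabajo", "Año últ. trabajo", 0)]
      ++ (PySem.List.pyRange 1 7).map (fun i =>
           ("accion" ++ PySem.Int.toStr i, "Acción " ++ PySem.Int.toStr i, (1 : Int)))
      ++ [("nota", "Nota", 2)])).1
    = PySem.Str.join "\n" (pvLinesA (pvI fila) (pvAcc fila) (pvN fila))
  rw [show ([("area", "Área", (0:Int)), ("tipo", "Tipo empresa", 0),
        ("año_ultimo_trabajo", "Año últ. trabajo", 0)]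
      ++ (PySem.List.pyRange 1 7).map (fun i =>
           ("accion" ++ PySem.Int.toStr i, "Acción " ++ PySem.Int.toStr i, (1 : Int)))
      ++ [("nota", "Nota", 2)])
    = (([("area", "Área"), ("tipo", "Tipo empresa"),
        ("año_ultimo_trabajo", "Año últ. trabajo")]).map (fun p => (p.1, p.2, (0:Int)))
      ++ ((PySem.List.pyRange 1 7).map (fun i =>
           ("accion" ++ PySem.Int.toStr i, "Acción " ++ PySem.Int.toStr i))).map
             (fun p => (p.1, p.2, (1:Int)))
      ++ ([("nota", "Nota")]).map (fun p => (p.1, p.2, (2:Int)))) from by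
      simp [List.map_map, Function.comp_def]]
  rw [List.foldl_append, List.foldl_append]
  rw [run_group, run_group, run_group]
  rw [show pvAfter ("", none) 0
        (((([("area", "Área"), ("tipo", "Tipo empresa"),
            ("año_ultimo_trabajo", "Año últ. trabajo")]).filter
              (fun p => pvOk (pvGet fila p.1))).map (fun p => p.2 ++ ": " ++ pvGet fila p.1)))
      = pvAfter ("", none) 0 (pvI fila) from by
      unfold pvI
      by_cases h1 : pvOk (pvGet fila "area") <;>
        by_cases h2 : pvOk (pvGet fila "tipo") <;>
          by_cases h3 : pvOk (pvGet fila "año_ultimo_trabajo") <;>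
            simp [h1, h2, h3]]
  rw [accHelp]
  have hN : (pvAfter (pvAfter (pvAfter ("", none) 0 (pvI fila)) 1 (pvAcc fila)) 2
        ((([("nota", "Nota")]).filter (fun p => pvOk (pvGet fila p.1))).map
          (fun p => p.2 ++ ": " ++ pvGet fila p.1)))
      = pvAfter (pvAfter (pvAfter ("", none) 0 (pvI fila)) 1 (pvAcc fila)) 2 (pvN fila) := by
    unfold pvN
    by_cases h : pvOk (pvGet fila "nota") <;> simp [h]
  rw [show ((PySem.List.pyRange 1 7).filter
        (fun i => pvOk (pvGet fila ("accion" ++ PySem.Int.toStr i)))).map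
          (fun i => "Acción " ++ PySem.Int.toStr i ++ ": "
            ++ pvGet fila ("accion" ++ PySem.Int.toStr i)) = pvAcc fila from rfl]
  rw [hN, pvAfter3]

theorem hA (fila : List (String × String)) :
    construir_notes fila
      = PySem.Str.join "\n" (pvLinesA (pvI fila) (pvAcc fila) (pvN fila)) := by
  unfold construir_notes
  simp only [PySem.List.foldl_append_if, List.nil_append]
  by_cases hn : pvOk (pvGet fila "nota") <;>
    simp [pvLinesA, pvI, pvAcc, pvN, hn]

-- ===== VERDICT =====
theorem construir_notes_spec : Claim_equal_construir_notes := by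
  intro fila _
  show construir_notes fila = construir_notes_alt fila
  rw [hA, hB]
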